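-- pv_equiv track=rewrite | github.com/SHINSUNGH/Chat_GPT | test02.py | solution
-- ===== SOURCE A (Python) =====
-- def solution(keymap, targets):
--     answer = [] # 결과를 저장할 리스트
--     for target in targets: # 각각의 문자열에 대해
--         count = 0 # 누른 횟수를 저장할 변수
--         prev = '' # 이전에 누른 문자를 저장할 변수
--         for char in target: # 문자열의 각 문자에 대해
--             for i in range(len(keymap)): # keymap을 순회하며
--                 if char in keymap[i]: # 해당 문자가 keymap[i]에 있으면
--                     if prev == keymap[i].index(char): # 이전에 누른 문자와 같은 문자를 누르면
--                         count += 1 # 누른 횟수를 증가시키지 않음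
--                     else: # 이전에 누른 문자와 다른 문자를 누르면
--                         count += keymap[i].index(char) + 1 # 누른 횟수를 증가시킴
--                         prev = keymap[i].index(char) # 이전에 누른 문자를 현재 문자로 변경
--                     break # 문자를 찾았으므로 더 이상 순회하지 않음
--             else: # 문자를 찾지 못한 경우
--                 count = -1 # 누를 수 없으므로 -1 저장
--                 break # 더 이상 순회하지 않음
--         answer.append(count) # 결과 리스트에 누른 횟수 추가
--     return answer # 결과 반환
-- ===== SOURCE B (Python) =====
-- def solution(keymap, targets):
--     # Stage 1: one char -> press-position table (first keymap entry containing
--     # the char, first occurrence within it).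
--     pos = {}
--     for s in keymap:
--         for i, c in enumerate(s):
--             pos.setdefault(c, i)
--     # Stage 2: closed form per target.  Every key press costs at least 1, and
--     # moving to a NEW key (a run start in the position sequence) costs its
--     # position extra, so: count = len(target) + sum of positions at run starts.
--     answer = []
--     for t in targets:
--         ps = [pos.get(c, -1) for c in t]
--         if -1 in ps:
--             answer.append(-1)
--         elif not ps:
--             answer.append(0)
--         else:
--             answer.append(len(ps) + ps[0]
--                           + sum(p for q, p in zip(ps, ps[1:]) if p != q))
--     return answer
-- ===== Notes on version B (the rewrite author's own statement) =====
-- stated objective: faster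
-- what changed: B replaces A's stateful press-count loop (prev register, per-char keymap scan and str.index) by staged passes and a closed-form identity: build one char->position table from the keymap, map each target to its position list, and return len(target) + first position + sum of positions at run starts (or -1 on a missing char).
import Mathlib
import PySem

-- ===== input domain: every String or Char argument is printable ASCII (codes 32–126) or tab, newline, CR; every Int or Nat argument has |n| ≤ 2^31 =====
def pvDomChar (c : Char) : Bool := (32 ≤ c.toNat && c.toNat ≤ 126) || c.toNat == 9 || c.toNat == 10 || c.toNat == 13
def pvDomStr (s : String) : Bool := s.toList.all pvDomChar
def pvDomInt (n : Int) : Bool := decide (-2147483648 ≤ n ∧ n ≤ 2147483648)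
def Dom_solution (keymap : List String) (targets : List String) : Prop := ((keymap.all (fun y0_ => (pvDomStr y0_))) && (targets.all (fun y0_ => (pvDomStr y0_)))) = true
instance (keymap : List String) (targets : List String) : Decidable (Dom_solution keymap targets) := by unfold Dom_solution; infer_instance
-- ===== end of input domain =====

-- B replaces A's stateful press-count loop by one precomputed char→position table and the
-- closed form len(target) + sum of positions at run starts (objective: faster).

-- ===== PORT A =====
-- Python's `char in keymap[i]` / `keymap[i].index(char)` on a 1-char needle are exactly
-- list membership / first-index on the character list (ported by hand, exact there).
-- A's inner `for i in range(len(keymap)) … break / else` = first entry containing the char: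
def pvAFind (keymap : List String) (c : Char) : Option Int :=
  match keymap with
  | [] => none
  | s :: rest =>
      if s.toList.contains c then
        some (((PySem.List.index? s.toList c).getD 0 : Nat) : Int)
      else pvAFind rest c

-- A's `prev` starts as '' and later holds an int; `'' == <int>` is always False in
-- Python, so `prev` is ported as Option Int with none for the initial ''.
def pvALoop (keymap : List String) (chars : List Char) (count : Int) (prev : Option Int) : Int :=
  match chars with
  | [] => count
  | c :: rest =>
      match pvAFind keymap c with
      | none => -1
      | some p =>
          if prev = some p then pvALoop keymap rest (count + 1) prev
          else pvALoop keymap rest (count + p + 1) (some p)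

def solution (keymap : List String) (targets : List String) : List Int :=
  targets.foldl (fun answer t => answer ++ [pvALoop keymap t.toList 0 none]) []

-- ===== PORT B =====
-- pos.setdefault(c, i) over enumerate(s) for each keymap entry:
def pvBPos (keymap : List String) : PySem.Dict Char Int :=
  keymap.foldl
    (fun d s => (PySem.List.enumerate s.toList).foldl (fun d ic => d.setdefault ic.2 ic.1) d)
    PySem.Dict.empty

-- `-1 if missing else len(ps) + ps[0] + sum(p for q, p in zip(ps, ps[1:]) if p != q)`
def pvBCount (ps : List Int) : Int :=
  if ps.contains (-1) then -1
  else
    match ps with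
    | [] => 0
    | p0 :: _ =>
        (ps.length : Int) + p0 +
          ((((ps.zip ps.tail).filter (fun qp => qp.2 != qp.1)).map (fun qp => qp.2)).sum)

def solution_alt (keymap : List String) (targets : List String) : List Int :=
  let pos := pvBPos keymap
  targets.foldl
    (fun answer t => answer ++ [pvBCount (t.toList.map (fun c => pos.getD c (-1)))]) []

-- ===== PRECONDITION & SPEC =====
def Spec_solution (keymap : List String) (targets : List String) (out : List Int) : Prop := out = solution_alt keymap targets
instance (keymap : List String) (targets : List String) (out : List Int) : Decidable (Spec_solution keymap targets out) := by unfold Spec_solution; infer_instance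

-- ===== CLAIM (what is proved, stated in full; the proofs are below) =====
def Claim_equal_solution : Prop := ∀ (keymap : List String) (targets : List String), Dom_solution keymap targets → Spec_solution keymap targets (solution keymap targets)

-- ===== LEMMAS AND PROOFS =====

-- the setdefault fold over one enumerated entry: first occurrence wins, existing keys kept
theorem pvPos_entry (cs : List Char) (c : Char) :
    ∀ (k : Int) (d : PySem.Dict Char Int),
      ((PySem.List.enumerate cs k).foldl (fun d ic => d.setdefault ic.2 ic.1) d).get? c
        = (d.get? c).or ((PySem.List.index? cs c).map (fun j => k + Int.ofNat j)) := by
  induction cs with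
  | nil => intro k d; simp [PySem.List.enumerate, PySem.List.index?]
  | cons x rest ih =>
      intro k d
      simp only [PySem.List.enumerate, List.foldl_cons]
      rw [ih]
      by_cases hx : c = x
      · subst hx
        rw [PySem.Dict.get?_setdefault_self, PySem.List.index?_cons_self]
        cases h : d.get? c <;> simp [Option.or]
      · rw [PySem.Dict.get?_setdefault_of_ne d _ hx,
            PySem.List.index?_cons_of_ne _ (fun h => hx h.symm)]
        congr 1
        cases h : PySem.List.index? rest c with
        | none => rfl
        | some j => simp; omega

-- the whole dict agrees with A's scan of the keymap
theorem pvPos_eq_find (keymap : List String) (c : Char) :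
    (pvBPos keymap).get? c = pvAFind keymap c := by
  have main : ∀ (km : List String) (d : PySem.Dict Char Int),
      ((km.foldl (fun d s => (PySem.List.enumerate s.toList).foldl
          (fun d ic => d.setdefault ic.2 ic.1) d) d).get? c)
        = (d.get? c).or (pvAFind km c) := by
    intro km
    induction km with
    | nil => intro d; simp [pvAFind, Option.or_none]
    | cons s rest ih =>
        intro d
        simp only [List.foldl_cons]
        rw [ih, pvPos_entry, Option.or_assoc]
        congr 1
        conv_rhs => rw [pvAFind]
        by_cases hm : s.toList.contains c = true
        · have hmem : c ∈ s.toList := List.contains_iff_mem.mp hm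
          obtain ⟨j, hj⟩ := Option.isSome_iff_exists.mp
            ((PySem.List.index?_isSome_iff _ _).mpr hmem)
          rw [if_pos hm, hj]
          simp [Option.or]
        · have hj : PySem.List.index? s.toList c = none :=
            (PySem.List.index?_eq_none_iff _ _).mpr
              (fun h => hm (List.contains_iff_mem.mpr h))
          rw [if_neg hm, hj]
          rfl
  rw [pvBPos, main, PySem.Dict.get?_empty]
  cases pvAFind keymap c <;> rfl

-- A's found positions are nonnegative, so the -1 default never collides
theorem pvAFind_nonneg (keymap : List String) (c : Char) (p : Int)
    (h : pvAFind keymap c = some p) : 0 ≤ p := by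
  induction keymap with
  | nil => simp [pvAFind] at h
  | cons s rest ih =>
      unfold pvAFind at h
      by_cases hm : s.toList.contains c = true
      · rw [if_pos hm] at h
        have := Option.some.inj h
        omega
      · rw [if_neg hm] at h
        exact ih h

def pvF (keymap : List String) (c : Char) : Int := (pvAFind keymap c).getD (-1)

-- A's per-press cost after the first press, given previous position q
def pvSumAdj (q : Int) : List Int → Int
  | [] => 0
  | p :: rest => (if p = q then 1 else p + 1) + pvSumAdj p rest

-- B's run-start position sum, given previous position q
def pvSumC (q : Int) : List Int → Int
  | [] => 0
  | p :: rest => (if p = q then 0 else p) + pvSumC p rest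

-- each press costs 1 plus its position iff it starts a run
theorem pvSumAdj_eq (ps : List Int) : ∀ q : Int,
    pvSumAdj q ps = (ps.length : Int) + pvSumC q ps := by
  induction ps with
  | nil => intro q; simp [pvSumAdj, pvSumC]
  | cons p rest ih =>
      intro q
      simp only [pvSumAdj, pvSumC, List.length_cons, ih p]
      by_cases h : p = q <;> simp [h] <;> omega

-- B's filtered zip-with-tail sum is the run-start sum
theorem pvZipFilter_sum (ps : List Int) : ∀ (p0 : Int),
    ((((p0 :: ps).zip ps).filter (fun qp => qp.2 != qp.1)).map (fun qp => qp.2)).sum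
      = pvSumC p0 ps := by
  induction ps with
  | nil => intro p0; simp [pvSumC]
  | cons p rest ih =>
      intro p0
      simp only [List.zip_cons_cons, List.filter_cons]
      by_cases h : p = p0
      · subst h; simp [pvSumC, ih p]
      · simp [h, pvSumC, ih p]

-- A's stateful loop after the first key press, against the pairwise formula
theorem pvALoop_run (keymap : List String) (chars : List Char) :
    ∀ (count q : Int),
      pvALoop keymap chars count (some q)
        = if (-1 : Int) ∈ chars.map (pvF keymap) then -1
          else count + pvSumAdj q (chars.map (pvF keymap)) := by
  induction chars with
  | nil => intro count q; simp [pvALoop, pvSumAdj]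
  | cons c rest ih =>
      intro count q
      unfold pvALoop
      cases hf : pvAFind keymap c with
      | none =>
          have hc : pvF keymap c = -1 := by simp [pvF, hf]
          simp [List.map_cons, hc]
      | some p =>
          dsimp only
          have hp : 0 ≤ p := pvAFind_nonneg _ _ _ hf
          have hpc : pvF keymap c = p := by simp [pvF, hf]
          have hne : ¬ ((-1 : Int) = p) := by omega
          have step : ∀ cnt : Int, pvALoop keymap rest cnt (some p)
              = if (-1 : Int) ∈ (c :: rest).map (pvF keymap) then -1
                else cnt + pvSumAdj p (rest.map (pvF keymap)) := by
            intro cnt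
            rw [ih]
            simp only [List.map_cons, List.mem_cons, hpc]
            by_cases hrest : (-1 : Int) ∈ rest.map (pvF keymap)
            · simp [hrest]
            · simp [hrest, hne]
          by_cases hq : q = p
          · subst hq
            rw [if_pos rfl, step]
            simp only [List.map_cons, List.mem_cons, hpc]
            by_cases hrest : (-1 : Int) ∈ rest.map (pvF keymap)
            · simp [hrest]
            · simp [hrest, hne, pvSumAdj]; ring
          · rw [if_neg (by simpa using hq), step]
            simp only [List.map_cons, List.mem_cons, hpc]
            by_cases hrest : (-1 : Int) ∈ rest.map (pvF keymap)
            · simp [hrest]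
            · have hq' : ¬ (p = q) := fun h => hq h.symm
              simp [hrest, hne, pvSumAdj, hq']; ring

-- one target: A's whole loop equals B's closed form on the positions list
theorem pvTarget_eq (keymap : List String) (chars : List Char) :
    pvALoop keymap chars 0 none = pvBCount (chars.map (pvF keymap)) := by
  cases chars with
  | nil => simp [pvALoop, pvBCount]
  | cons c rest =>
      unfold pvALoop pvBCount
      cases hf : pvAFind keymap c with
      | none =>
          have hc : pvF keymap c = -1 := by simp [pvF, hf]
          rw [if_pos (List.contains_iff_mem.mpr (by simp [List.map_cons, hc]))]
      | some p =>
          dsimp only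
          have hp : 0 ≤ p := pvAFind_nonneg _ _ _ hf
          have hpc : pvF keymap c = p := by simp [pvF, hf]
          have hne : ¬ ((-1 : Int) = p) := by omega
          rw [if_neg (by simp : ¬ ((none : Option Int) = some p)), pvALoop_run]
          simp only [List.map_cons, List.tail_cons]
          rw [hpc, pvZipFilter_sum (rest.map (pvF keymap)) p, pvSumAdj_eq]
          by_cases hrest : (-1 : Int) ∈ rest.map (pvF keymap)
          · rw [if_pos hrest,
              if_pos (List.contains_iff_mem.mpr (List.mem_cons.mpr (Or.inr hrest)))]
          · rw [if_neg hrest,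
              if_neg (fun h => by
                rcases List.mem_cons.mp (List.contains_iff_mem.mp h) with h1 | h1
                · exact hne h1
                · exact hrest h1)]
            simp only [List.length_cons]
            push_cast
            ring

-- ===== VERDICT (by name: the statement is the Claim_ definition above) =====
theorem solution_spec : Claim_equal_solution := by
  intro keymap targets _
  unfold Spec_solution solution solution_alt
  rw [PySem.List.foldl_append_singleton_eq_map, PySem.List.foldl_append_singleton_eq_map]
  apply List.map_congr_left
  intro t _
  rw [pvTarget_eq]
  congr 1
  apply List.map_congr_left
  intro c _
  rw [PySem.Dict.getD_eq_get?_getD, pvPos_eq_find]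
  rfl
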